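-- pv_equiv track=rewrite | github.com/tapishr/Interview-Prep | priya/interviewbit/Noble Number.py | solve
-- ===== SOURCE A (Python) =====
-- def solve(A):
--     A = sorted(A)
--     n = len(A)
--     for i in range(len(A)):
--
--         while(i< n-1 and A[i]==A[i+1]):
--             i+=1
--         if(A[i]==n-1-i):
--             return 1
--     return -1
-- ===== SOURCE B (Python) =====
-- def solve(A):
--     seen = set()
--     for v in A:
--         if v not in seen:
--             seen.add(v)
--             greater = 0
--             for x in A:
--                 if x > v:
--                     greater += 1
--             if greater == v:
--                 return 1
--     return -1
-- ===== Notes on version B (the rewrite author's own statement) =====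
-- stated objective: alternative
-- what changed: B drops the sort entirely: for each distinct value (tracked with a set) it counts the elements strictly greater than it directly, instead of A's sort-then-scan with an inner duplicate-skipping while loop over indices.
import Mathlib
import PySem

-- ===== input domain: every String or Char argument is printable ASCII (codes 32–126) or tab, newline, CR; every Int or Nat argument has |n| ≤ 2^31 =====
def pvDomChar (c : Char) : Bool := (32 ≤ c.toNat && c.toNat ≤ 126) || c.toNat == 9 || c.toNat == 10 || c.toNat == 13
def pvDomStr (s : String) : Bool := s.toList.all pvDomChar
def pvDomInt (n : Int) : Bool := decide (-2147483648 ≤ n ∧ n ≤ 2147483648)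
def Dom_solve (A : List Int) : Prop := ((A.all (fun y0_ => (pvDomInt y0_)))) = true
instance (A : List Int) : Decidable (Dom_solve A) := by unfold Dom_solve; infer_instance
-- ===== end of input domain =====

-- B is an alternative algorithm (no sort: per distinct value, count the strictly greater elements); same return value, not claimed faster.

-- ===== PORT A =====
-- the inner 'while(i<n-1 and A[i]==A[i+1]): i+=1'
def skipA (S : List Int) (i : Int) : Int :=
  if h : i < (S.length : Int) - 1 ∧ PySem.List.pyGet? S i = PySem.List.pyGet? S (i + 1) then
    skipA S (i + 1)
  else i
termination_by ((S.length : Int) - i).toNat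
decreasing_by omega

-- the 'for i in range(len(A))' loop with its early return
def solveLoopA (S : List Int) : List Int → Int
  | [] => -1
  | i :: rest =>
    let j := skipA S i
    if PySem.List.pyGet? S j = some ((S.length : Int) - 1 - j) then 1 else solveLoopA S rest

def solve (A : List Int) : Int :=
  let S := PySem.List.sorted A (fun x => x) false
  solveLoopA S (PySem.List.pyRange 0 (S.length : Int) 1)

-- ===== PORT B =====
-- 'greater = 0; for x in A: if x > v: greater += 1'
def countGreaterB (A : List Int) (v : Int) : Int :=
  A.foldl (fun g x => if v < x then g + 1 else g) 0

-- 'for v in A:' with the seen set and early return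
def solveLoopB (A : List Int) (seen : PySem.Set Int) : List Int → Int
  | [] => -1
  | v :: rest =>
    if PySem.Set.contains seen v then solveLoopB A seen rest
    else
      if countGreaterB A v = v then 1
      else solveLoopB A (PySem.Set.add seen v) rest

def solve_alt (A : List Int) : Int := solveLoopB A PySem.Set.empty A

-- ===== PRECONDITION & SPEC =====
def Spec_solve (A : List Int) (out : Int) : Prop := out = solve_alt A
instance (A : List Int) (out : Int) : Decidable (Spec_solve A out) := by unfold Spec_solve; infer_instance

-- ===== CLAIM (what is proved, stated in full; the proofs are below) =====
def Claim_equal_solve : Prop := ∀ (A : List Int), Dom_solve A → Spec_solve A (solve A)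

-- ===== LEMMAS AND PROOFS =====

-- a noble number exists: some value equals the number of strictly greater elements
def Noble (A : List Int) : Prop :=
  ∃ v ∈ A, (A.countP (fun x => decide (v < x)) : Int) = v

theorem countGreaterB_go (A : List Int) (v g : Int) :
    A.foldl (fun g x => if v < x then g + 1 else g) g
      = g + (A.countP (fun x => decide (v < x)) : Int) := by
  induction A generalizing g with
  | nil => simp
  | cons a t ih =>
    simp only [List.foldl_cons, List.countP_cons]
    by_cases h : v < a
    · simp [h, ih]; ring
    · simp [h, ih]

theorem countGreaterB_eq (A : List Int) (v : Int) :
    countGreaterB A v = (A.countP (fun x => decide (v < x)) : Int) := by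
  simpa using countGreaterB_go A v 0

theorem loopB_eq_one_iff (A : List Int) (seen : PySem.Set Int) (rest : List Int) :
    solveLoopB A seen rest = 1 ↔
      ∃ v ∈ rest, v ∉ seen ∧ countGreaterB A v = v := by
  induction rest generalizing seen with
  | nil => simp [solveLoopB]
  | cons v vs ih =>
    simp only [solveLoopB]
    by_cases hm : v ∈ seen
    · rw [if_pos ((PySem.Set.contains_iff seen v).mpr hm), ih]
      constructor
      · rintro ⟨w, hw, hws, hP⟩; exact ⟨w, List.mem_cons_of_mem _ hw, hws, hP⟩
      · rintro ⟨w, hw, hws, hP⟩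
        rcases List.mem_cons.mp hw with rfl | hw
        · exact absurd hm hws
        · exact ⟨w, hw, hws, hP⟩
    · rw [if_neg (fun hc => hm ((PySem.Set.contains_iff seen v).mp hc))]
      by_cases hP : countGreaterB A v = v
      · simp only [if_pos hP]
        constructor
        · intro _; exact ⟨v, List.mem_cons_self, hm, hP⟩
        · intro _; trivial
      · rw [if_neg hP, ih]
        constructor
        · rintro ⟨w, hw, hws, hQ⟩
          refine ⟨w, List.mem_cons_of_mem _ hw, fun hws' => hws ?_, hQ⟩
          exact (PySem.Set.mem_add seen v w).mpr (Or.inl hws')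
        · rintro ⟨w, hw, hws, hQ⟩
          rcases List.mem_cons.mp hw with rfl | hw
          · exact absurd hQ hP
          · refine ⟨w, hw, fun hws' => ?_, hQ⟩
            rcases (PySem.Set.mem_add seen v w).mp hws' with h | rfl
            · exact hws h
            · exact hP hQ

theorem loopB_cases (A : List Int) (seen : PySem.Set Int) (rest : List Int) :
    solveLoopB A seen rest = 1 ∨ solveLoopB A seen rest = -1 := by
  induction rest generalizing seen with
  | nil => right; rfl
  | cons v vs ih =>
    simp only [solveLoopB]
    split_ifs <;> first | (left; rfl) | exact ih _

theorem solve_alt_eq_one_iff (A : List Int) : solve_alt A = 1 ↔ Noble A := by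
  unfold solve_alt Noble
  rw [loopB_eq_one_iff]
  constructor
  · rintro ⟨v, hv, -, hP⟩; exact ⟨v, hv, by rw [← countGreaterB_eq A v]; exact hP⟩
  · rintro ⟨v, hv, hP⟩
    exact ⟨v, hv, by simp [PySem.Set.empty], by rw [countGreaterB_eq]; exact hP⟩

theorem skip_ge (S : List Int) (i : Int) : i ≤ skipA S i := by
  fun_induction skipA S i with
  | case1 i h ih => omega
  | case2 i h => omega

theorem skip_lt (S : List Int) (i : Int) (h : i < (S.length : Int)) :
    skipA S i < (S.length : Int) := by
  fun_induction skipA S i with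
  | case1 i h ih => exact ih (by omega)
  | case2 i h => exact h

theorem skip_get (S : List Int) (i : Int) :
    PySem.List.pyGet? S (skipA S i) = PySem.List.pyGet? S i := by
  fun_induction skipA S i with
  | case1 i h ih => rw [ih, h.2]
  | case2 i h => rfl

theorem skip_stop (S : List Int) (i : Int) :
    ¬ (skipA S i < (S.length : Int) - 1 ∧
       PySem.List.pyGet? S (skipA S i) = PySem.List.pyGet? S (skipA S i + 1)) := by
  fun_induction skipA S i with
  | case1 i h ih => exact ih
  | case2 i h => exact h

theorem countP_gt_of_runEnd (S : List Int) (hp : S.Pairwise (· ≤ ·)) (j : Nat)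
    (hj : j < S.length)
    (hend : j + 1 = S.length ∨ ∃ h : j + 1 < S.length, S[j] < S[j + 1]) :
    S.countP (fun x => decide (S[j] < x)) = S.length - (j + 1) := by
  have hpg := List.pairwise_iff_getElem.mp hp
  have hmono : ∀ k, j < k → (hk : k < S.length) → S[j] < S[k] := by
    intro k hjk hk
    rcases hend with hend | ⟨hlt, hend⟩
    · omega
    · rcases Nat.eq_or_lt_of_le hjk with rfl | hjk'
      · omega
      · rcases Nat.eq_or_lt_of_le (Nat.succ_le_of_lt hjk) with h | h
        · exact h ▸ hend
        · exact lt_of_lt_of_le hend (hpg (j+1) k hlt hk h)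
  set v := S[j] with hv
  have hcnt : S.countP (fun x => decide (v < x))
      = (S.take (j+1)).countP (fun x => decide (v < x))
        + (S.drop (j+1)).countP (fun x => decide (v < x)) := by
    conv_lhs => rw [← List.take_append_drop (j+1) S]
    rw [List.countP_append]
  rw [hcnt]
  have h1 : (S.take (j+1)).countP (fun x => decide (v < x)) = 0 := by
    rw [List.countP_eq_zero]
    intro x hx
    rcases List.mem_iff_getElem.mp hx with ⟨k, hk, hkx⟩
    have hk' : k < S.length := lt_of_lt_of_le hk (by simp [List.length_take])
    have hkj : k ≤ j := by simp [List.length_take] at hk; omega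
    have : x = S[k] := by rw [← hkx]; simp [List.getElem_take]
    subst this
    rcases Nat.eq_or_lt_of_le hkj with rfl | hkj'
    · simp [hv]
    · simp only [decide_eq_true_eq, not_lt, hv]
      exact hpg k j hk' hj hkj' 
  have h2 : (S.drop (j+1)).countP (fun x => decide (v < x)) = S.length - (j+1) := by
    rw [List.countP_eq_length.mpr, List.length_drop]
    intro x hx
    rcases List.mem_iff_getElem.mp hx with ⟨k, hk, hkx⟩
    have hk' : (j+1) + k < S.length := by simp [List.length_drop] at hk; omega
    have : x = S[(j+1)+k] := by rw [← hkx]; simp [List.getElem_drop]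
    subst this
    exact decide_eq_true (hmono _ (by omega) hk')
  omega

theorem loopA_eq_one_iff (S : List Int) (is : List Int) :
    solveLoopA S is = 1 ↔
      ∃ i ∈ is, PySem.List.pyGet? S (skipA S i)
        = some ((S.length : Int) - 1 - skipA S i) := by
  induction is with
  | nil => simp [solveLoopA]
  | cons i rest ih =>
    simp only [solveLoopA]
    by_cases hc : PySem.List.pyGet? S (skipA S i)
        = some ((S.length : Int) - 1 - skipA S i)
    · simp only [if_pos hc]
      exact ⟨fun _ => ⟨i, List.mem_cons_self, hc⟩, fun _ => trivial⟩
    · rw [if_neg hc, ih]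
      constructor
      · rintro ⟨w, hw, hcw⟩; exact ⟨w, List.mem_cons_of_mem _ hw, hcw⟩
      · rintro ⟨w, hw, hcw⟩
        rcases List.mem_cons.mp hw with rfl | hw
        · exact absurd hcw hc
        · exact ⟨w, hw, hcw⟩

theorem loopA_cases (S : List Int) (is : List Int) :
    solveLoopA S is = 1 ∨ solveLoopA S is = -1 := by
  induction is with
  | nil => right; rfl
  | cons i rest ih =>
    simp only [solveLoopA]
    split_ifs
    · left; rfl
    · exact ih

theorem countP_at_skip (S : List Int) (hpair : S.Pairwise (· ≤ ·)) (i : Int)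
    (hi0 : 0 ≤ i) (hi : i < (S.length : Int)) :
    ∃ hlt : (skipA S i).toNat < S.length,
      S.countP (fun x => decide (S[(skipA S i).toNat] < x))
        = S.length - ((skipA S i).toNat + 1) := by
  have h0j : 0 ≤ skipA S i := le_trans hi0 (skip_ge S i)
  have hjlt : skipA S i < (S.length : Int) := skip_lt S i hi
  set j := skipA S i with hj
  have hltN : j.toNat < S.length := by omega
  refine ⟨hltN, countP_gt_of_runEnd S hpair j.toNat hltN ?_⟩
  have hstop := skip_stop S i
  rw [← hj] at hstop
  by_cases hlast : j.toNat + 1 = S.length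
  · exact Or.inl hlast
  · right
    have hlt1 : j.toNat + 1 < S.length := by omega
    refine ⟨hlt1, ?_⟩
    have hne : PySem.List.pyGet? S j ≠ PySem.List.pyGet? S (j + 1) := by
      intro hcontra; exact hstop ⟨by omega, hcontra⟩
    have hg1 : PySem.List.pyGet? S j = some S[j.toNat] :=
      PySem.List.pyGet?_eq_some_getElem S h0j hjlt
    have hg2 : PySem.List.pyGet? S (j + 1) = some S[(j + 1).toNat] :=
      PySem.List.pyGet?_eq_some_getElem S (i := j+1) (by omega) (by omega)
    have hidx : (j + 1).toNat = j.toNat + 1 := by omega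
    have hneq : S[j.toNat] ≠ S[j.toNat + 1] := by
      intro he
      apply hne
      rw [hg1, hg2]
      congr 1
      exact he.trans (getElem_congr (Eq.refl S) hidx.symm hlt1)
    have hle : S[j.toNat] ≤ S[j.toNat + 1] :=
      List.pairwise_iff_getElem.mp hpair j.toNat (j.toNat + 1) hltN hlt1 (by omega)
    exact lt_of_le_of_ne hle hneq

theorem solve_eq_one_iff (A : List Int) : solve A = 1 ↔ Noble A := by
  have hperm : (PySem.List.sorted A (fun x => x) false).Perm A := PySem.List.sorted_perm A _ _
  have hpair : (PySem.List.sorted A (fun x => x) false).Pairwise (· ≤ ·) := by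
    exact PySem.List.sorted_pairwise A (fun x => x)
  set S := PySem.List.sorted A (fun x => x) false with hS
  have e1 : solve A = solveLoopA S (PySem.List.pyRange 0 (S.length : Int) 1) := rfl
  rw [e1, loopA_eq_one_iff]
  constructor
  · rintro ⟨i, hi, hchk⟩
    have hi' := (PySem.List.mem_pyRange_one).mp hi
    obtain ⟨hltN, hcnt⟩ := countP_at_skip S hpair i hi'.1 hi'.2
    set j := skipA S i with hj
    have h0j : 0 ≤ j := le_trans hi'.1 (skip_ge S i)
    have hjlt : j < (S.length : Int) := skip_lt S i hi'.2
    have hg : PySem.List.pyGet? S j = some S[j.toNat] :=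
      PySem.List.pyGet?_eq_some_getElem S h0j hjlt
    rw [hg] at hchk
    have hv : S[j.toNat] = (S.length : Int) - 1 - j := by
      exact Option.some.inj hchk
    refine ⟨S[j.toNat], hperm.mem_iff.mp (List.getElem_mem hltN), ?_⟩
    rw [← hperm.countP_eq, hcnt, hv]
    omega
  · rintro ⟨v, hvA, hcnt⟩
    obtain ⟨k, hk, hkv⟩ := List.mem_iff_getElem.mp (hperm.mem_iff.mpr hvA)
    refine ⟨(k : Int), (PySem.List.mem_pyRange_one).mpr ⟨by omega, by omega⟩, ?_⟩
    obtain ⟨hltN, hcntS⟩ := countP_at_skip S hpair (k : Int) (by omega) (by omega)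
    set j := skipA S (k : Int) with hj
    have h0j : 0 ≤ j := le_trans (by omega) (skip_ge S (k : Int))
    have hjlt : j < (S.length : Int) := skip_lt S (k : Int) (by omega)
    have hgk : PySem.List.pyGet? S (k : Int) = some S[k] := by
      rw [PySem.List.pyGet?_eq_some_getElem S (i := (k : Int)) (by omega) (by omega)]
      simp
    have hg : PySem.List.pyGet? S j = some S[j.toNat] :=
      PySem.List.pyGet?_eq_some_getElem S h0j hjlt
    have hjv : S[j.toNat] = v := by
      have := skip_get S (k : Int)
      rw [← hj, hg, hgk] at this
      rw [Option.some.inj this, hkv]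
    rw [hg, hjv]
    congr 1
    rw [hjv] at hcntS
    rw [hperm.countP_eq] at hcntS
    omega

-- ===== VERDICT (by name: the statement is the Claim_ definition above) =====
theorem solve_spec : Claim_equal_solve := by
  intro A _
  unfold Spec_solve
  by_cases hN : Noble A
  · rw [(solve_eq_one_iff A).mpr hN, (solve_alt_eq_one_iff A).mpr hN]
  · have h1 : solve A ≠ 1 := fun h => hN ((solve_eq_one_iff A).mp h)
    have h2 : solve_alt A ≠ 1 := fun h => hN ((solve_alt_eq_one_iff A).mp h)
    have c1 := loopA_cases (PySem.List.sorted A (fun x => x) false)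
      (PySem.List.pyRange 0 ((PySem.List.sorted A (fun x => x) false).length : Int) 1)
    have c2 := loopB_cases A PySem.Set.empty A
    have e1 : solve A = solveLoopA (PySem.List.sorted A (fun x => x) false)
        (PySem.List.pyRange 0 ((PySem.List.sorted A (fun x => x) false).length : Int) 1) := rfl
    have e2 : solve_alt A = solveLoopB A PySem.Set.empty A := rfl
    rw [e1, e2]
    rw [e1] at h1; rw [e2] at h2
    omega
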